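-- pv_equiv track=rewrite | github.com/phildeutsch/data-mining | quiz3.py | calc_supports
-- ===== SOURCE A (Python) =====
-- def calc_supports(sdb):
--     # Calculate items in sequence DB
--     items = []
--     for sequence in sdb.values():
--         for transaction in sequence:
--             for item in transaction:
--                 if item not in items:
--                     items.append(item)
--
--     # Calculate support for each item
--     support = []
--     for i in items:
--         s = 0
--         for sequence in sdb.values():
--             thissequence = 0
--             for transaction in sequence:
--                 for item in transaction:
--                     if item == i and thissequence == 0:
--                         s = s + 1
--                         thissequence = 1
--
--         support.append(s)
--
--     itemsup = dict(zip(items, support))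
--     return(itemsup)
-- ===== SOURCE B (Python) =====
-- def calc_supports(sdb):
--     # One pass over the database: for each sequence, bump a counter for each
--     # distinct item it contains (first-occurrence order preserved by the dicts).
--     support = {}
--     for sequence in sdb.values():
--         seen = dict.fromkeys(item for transaction in sequence for item in transaction)
--         for item in seen:
--             support[item] = support.get(item, 0) + 1
--     return support
-- ===== Notes on version B (the rewrite author's own statement) =====
-- stated objective: faster
-- what changed: Instead of first collecting all distinct items and then rescanning the whole database once per item, B makes a single pass: per sequence it dedups the sequence's items and increments a counter dict, so the U full rescans disappear.
import Mathlib
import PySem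

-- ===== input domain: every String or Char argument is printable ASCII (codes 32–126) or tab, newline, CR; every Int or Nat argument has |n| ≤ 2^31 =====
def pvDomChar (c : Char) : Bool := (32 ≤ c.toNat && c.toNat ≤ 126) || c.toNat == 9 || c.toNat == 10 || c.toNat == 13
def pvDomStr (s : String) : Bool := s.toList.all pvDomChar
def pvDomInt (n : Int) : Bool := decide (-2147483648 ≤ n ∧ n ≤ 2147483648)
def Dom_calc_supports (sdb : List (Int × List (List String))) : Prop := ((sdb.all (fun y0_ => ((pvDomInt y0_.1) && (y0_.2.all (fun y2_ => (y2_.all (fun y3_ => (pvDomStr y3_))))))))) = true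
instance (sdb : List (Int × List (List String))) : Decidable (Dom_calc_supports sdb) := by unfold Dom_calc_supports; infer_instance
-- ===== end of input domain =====

-- B replaces A's "collect the distinct items, then rescan the whole DB once per item"
-- with a single pass that bumps a counter dict for each sequence's distinct items.

-- ===== PORT A =====
-- first loop of A: first-occurrence list of all items in the DB
def calc_supports_items (seqs : List (List (List String))) : List String :=
  seqs.foldl (fun its sequence =>
    sequence.foldl (fun its transaction =>
      transaction.foldl (fun its item =>
        if item ∈ its then its else its ++ [item]) its) its) []

-- second loop of A: for each item, rescan the whole DB, counting sequences
-- that contain it (the flag st.2 is A's 'thissequence')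
def calc_supports_support (seqs : List (List (List String))) (items : List String) : List Int :=
  items.foldl (fun sup i =>
    sup ++ [seqs.foldl (fun s sequence =>
        (sequence.foldl (fun st transaction =>
            transaction.foldl (fun st item =>
              if item = i ∧ st.2 = 0 then (st.1 + 1, (1 : Int)) else st) st)
          (s, (0 : Int))).1) (0 : Int)]) []

def calc_supports (sdb : List (Int × List (List String))) : List (String × Int) :=
  (PySem.Dict.ofList
    ((calc_supports_items (PySem.Dict.ofList sdb).values).zip
      (calc_supports_support (PySem.Dict.ofList sdb).values
        (calc_supports_items (PySem.Dict.ofList sdb).values)))).items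

-- ===== PORT B =====
def calc_supports_alt (sdb : List (Int × List (List String))) : List (String × Int) :=
  ((PySem.Dict.ofList sdb).values.foldl (fun support sequence =>
      (PySem.List.dedup (sequence.flatMap (fun transaction => transaction))).foldl
        (fun support item => support.insert item (support.getD item 0 + 1)) support)
    PySem.Dict.empty).items

-- ===== PRECONDITION & SPEC =====
def Spec_calc_supports (sdb : List (Int × List (List String))) (out : List (String × Int)) : Prop := out = calc_supports_alt sdb
instance (sdb : List (Int × List (List String))) (out : List (String × Int)) : Decidable (Spec_calc_supports sdb out) := by unfold Spec_calc_supports; infer_instance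

-- ===== CLAIM (what is proved, stated in full; the proofs are below) =====
def Claim_equal_calc_supports : Prop := ∀ (sdb : List (Int × List (List String))), Dom_calc_supports sdb → Spec_calc_supports sdb (calc_supports sdb)

-- ===== LEMMAS AND PROOFS =====

-- the items of one sequence, flattened
def pvFlat (sq : List (List String)) : List String := sq.flatMap (fun t => t)

-- support of item i: number of sequences whose flattened item list contains i
def pvCnt (seqs : List (List (List String))) (i : String) : Int :=
  (seqs.countP (fun sq => decide (i ∈ pvFlat sq)) : Int)

-- folding Set.update over a list of chunks = one update with the concatenation
theorem pv_foldl_update {β : Type} (f : β → List String) (l : List β) (s : PySem.Set String) :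
    l.foldl (fun s b => PySem.Set.update s (f b)) s = PySem.Set.update s (l.flatMap f) := by
  induction l generalizing s with
  | nil => simp [PySem.Set.update_nil]
  | cons b l ih => simp [ih, PySem.Set.update_append]

-- nested foldl over a list of chunks = foldl over the flattened list
theorem pv_foldl_flatMap {α β γ : Type} (f : β → List α) (g : γ → α → γ) (l : List β) (c : γ) :
    l.foldl (fun c b => (f b).foldl g c) c = (l.flatMap f).foldl g c := by
  induction l generalizing c with
  | nil => rfl
  | cons b l ih => simp [ih, List.foldl_append]

-- A's items loop is the ordered dedup of all items (its "append if not member" IS Set.add)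
theorem pv_items_eq (seqs : List (List (List String))) :
    calc_supports_items seqs = PySem.Set.ofList (seqs.flatMap pvFlat) := by
  unfold calc_supports_items
  simp only [← PySem.Set.add_eq_ite]
  have h1 : ∀ (sq : List (List String)) (its : PySem.Set String),
      sq.foldl (fun its transaction => transaction.foldl PySem.Set.add its) its
        = PySem.Set.update its (pvFlat sq) := by
    intro sq its
    have : ∀ (tr : List String) (s : PySem.Set String),
        tr.foldl PySem.Set.add s = PySem.Set.update s tr := fun _ _ => rfl
    simp only [this]
    exact pv_foldl_update (fun t => t) sq its
  simp only [h1]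
  rw [pv_foldl_update pvFlat seqs []]
  rfl
-- (the last `rfl`: Set.update [] xs = Set.ofList xs definitionally)

-- A's inner per-sequence loop on the flattened list
theorem pv_seq_loop (i : String) (L : List String) (s t : Int) :
    L.foldl (fun st item => if item = i ∧ st.2 = 0 then (st.1 + 1, (1 : Int)) else st) (s, t)
    = if t = 0 ∧ i ∈ L then (s + 1, 1) else (s, t) := by
  induction L generalizing s t with
  | nil => simp
  | cons a L ih =>
    by_cases ha : a = i <;> by_cases ht : t = 0 <;>
      simp [ha, ht, ih, List.mem_cons] <;> aesop

-- A's per-item count = pvCnt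
theorem pv_count_eq (seqs : List (List (List String))) (i : String) (s : Int) :
    seqs.foldl (fun s sequence =>
      (sequence.foldl (fun st transaction =>
          transaction.foldl (fun st item =>
            if item = i ∧ st.2 = 0 then (st.1 + 1, (1 : Int)) else st) st)
        (s, (0 : Int))).1) s = s + pvCnt seqs i := by
  induction seqs generalizing s with
  | nil => simp [pvCnt]
  | cons sq seqs ih =>
    simp only [List.foldl_cons, ih]
    rw [pv_foldl_flatMap (fun t => t)
      (fun st item => if item = i ∧ st.2 = 0 then (st.1 + 1, (1 : Int)) else st) sq]
    rw [pv_seq_loop]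
    simp only [pvCnt, pvFlat, List.countP_cons]
    by_cases hm : i ∈ sq.flatMap (fun t => t) <;>
      simp only [List.mem_flatMap] at hm <;> simp [hm] <;> push_cast <;> ring

-- A's support loop lists pvCnt for each item
theorem pv_support_eq (seqs : List (List (List String))) (items : List String) :
    calc_supports_support seqs items = items.map (pvCnt seqs) := by
  unfold calc_supports_support
  rw [PySem.List.foldl_append_singleton_eq_map]
  simp [pv_count_eq]

-- zipping a list with a map over itself
theorem pv_zip_map {α β : Type} (l : List α) (f : α → β) :
    l.zip (l.map f) = l.map (fun x => (x, f x)) := by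
  induction l with
  | nil => rfl
  | cons a l ih => simp [ih]

-- dict(zip(...)) over distinct keys returns exactly those pairs
theorem pv_ofList_items (l : List (String × Int)) (h : (l.map Prod.fst).Nodup) :
    (PySem.Dict.ofList l).items = l := by
  have h0 := PySem.Dict.items_foldl_insert_fresh l Prod.fst Prod.snd PySem.Dict.empty
    (fun a _ => PySem.Dict.contains_empty (Prod.fst a)) h
  have h1 : PySem.Dict.ofList l = l.foldl (fun d a => d.insert a.1 a.2) PySem.Dict.empty := rfl
  rw [h1, h0]
  simp [PySem.Dict.empty]

-- updating with a deduped list is updating with the list itself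
theorem pv_update_dedup (s : PySem.Set String) (L : List String) :
    PySem.Set.update s (PySem.List.dedup L) = PySem.Set.update s L := by
  rw [PySem.List.dedup_eq_ofList, PySem.Set.update_eq_append_filter,
      PySem.Set.update_eq_append_filter, PySem.Set.ofList_ofList]

-- keys of B's dict after processing seqs
theorem pv_keys_B (seqs : List (List (List String))) (d : PySem.Dict String Int) :
    (seqs.foldl (fun support sequence =>
        (PySem.List.dedup (sequence.flatMap (fun t => t))).foldl
          (fun support item => support.insert item (support.getD item 0 + 1)) support) d).keys
    = PySem.Set.update d.keys (seqs.flatMap pvFlat) := by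
  induction seqs generalizing d with
  | nil => simp [PySem.Set.update_nil]
  | cons sq seqs ih =>
    simp only [List.foldl_cons, ih]
    rw [PySem.Dict.keys_foldl_insert, pv_update_dedup]
    simp [PySem.Set.update_append, pvFlat]

-- count in a deduped list is a 0/1 membership indicator
theorem pv_count_dedup (L : List String) (i : String) :
    ((PySem.List.dedup L).count i : Int) = if i ∈ L then 1 else 0 := by
  rw [PySem.List.dedup_eq_ofList]
  by_cases hm : i ∈ L
  · rw [List.count_eq_one_of_mem (PySem.Set.nodup_ofList L) ((PySem.Set.mem_ofList L i).2 hm)]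
    simp [hm]
  · rw [List.count_eq_zero_of_not_mem (fun h => hm ((PySem.Set.mem_ofList L i).1 h))]
    simp [hm]

-- values of B's dict after processing seqs
theorem pv_getD_B (seqs : List (List (List String))) (d : PySem.Dict String Int) (i : String) :
    (seqs.foldl (fun support sequence =>
        (PySem.List.dedup (sequence.flatMap (fun t => t))).foldl
          (fun support item => support.insert item (support.getD item 0 + 1)) support) d).getD i 0
    = d.getD i 0 + pvCnt seqs i := by
  induction seqs generalizing d with
  | nil => simp [pvCnt]
  | cons sq seqs ih =>
    simp only [List.foldl_cons, ih]
    rw [PySem.Dict.getD_foldl_insert_add_one, pv_count_dedup]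
    simp only [pvCnt, pvFlat, List.countP_cons]
    by_cases hm : i ∈ sq.flatMap (fun t => t) <;> simp [hm] <;> push_cast <;> ring

-- both sides, as functions of the list of sequences
theorem pv_core (seqs : List (List (List String))) :
    (PySem.Dict.ofList
      ((calc_supports_items seqs).zip (calc_supports_support seqs (calc_supports_items seqs)))).items
    = (seqs.foldl (fun support sequence =>
        (PySem.List.dedup (sequence.flatMap (fun t => t))).foldl
          (fun support item => support.insert item (support.getD item 0 + 1)) support)
      PySem.Dict.empty).items := by
  -- A side: pairs (i, pvCnt seqs i) over the ordered dedup of all items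
  rw [pv_support_eq, pv_zip_map, pv_items_eq, pv_ofList_items]
  · -- B side
    have hk := pv_keys_B seqs PySem.Dict.empty
    simp only [PySem.Dict.keys_empty, PySem.Set.update_nil_left] at hk
    rw [PySem.Dict.items_eq_map_keys _ (hk ▸ PySem.Set.nodup_ofList _) (0 : Int), hk]
    refine List.map_congr_left (fun i _ => ?_)
    rw [pv_getD_B]
    simp
  · have hid : (Prod.fst ∘ fun x : String => (x, pvCnt seqs x)) = id := rfl
    simp only [List.map_map, hid, List.map_id]
    exact PySem.Set.nodup_ofList _

-- ===== VERDICT (by name: the statement is the Claim_ definition above) =====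
theorem calc_supports_spec : Claim_equal_calc_supports := by
  intro sdb _
  unfold Spec_calc_supports calc_supports calc_supports_alt
  exact pv_core (PySem.Dict.ofList sdb).values
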